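-- pv_equiv track=rewrite | github.com/GovindaPd/desktop-chess | main/chess/chessmixin.py | provide_threats_to_opp
-- ===== SOURCE A (Python) =====
-- def provide_threats_to_opp(my_chessmans_moves,opp_chessmans_positions):
--     """ this function return dictionaries of opp chessman position if they are in my chessman possile moves.
--     like: {'BQ75':[25,36,45]}   number of threats my chessman is providing"""
--     x = {}
--     for k,v in  my_chessmans_moves.items():
--         if len(v)>0:
--             for _ in opp_chessmans_positions.values():
--                 if _ in v:
--                     if k in x.keys():
--                         x[k].append(_)
--                     else:
--                         x.setdefault(k,[_])
--     return x
-- ===== SOURCE B (Python) =====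
-- def provide_threats_to_opp(my_chessmans_moves, opp_chessmans_positions):
--     """Inverted index (destination -> my pieces reaching it), then one pass over opponent positions."""
--     index = {}
--     for k, v in my_chessmans_moves.items():
--         for dest in dict.fromkeys(v):
--             index.setdefault(dest, []).append(k)
--     hits = {}
--     for p in opp_chessmans_positions.values():
--         for k in index.get(p, ()):
--             hits.setdefault(k, []).append(p)
--     return {k: hits[k] for k in my_chessmans_moves if k in hits}
-- ===== Notes on version B (the rewrite author's own statement) =====
-- stated objective: faster
-- what changed: A rescans every opponent position (testing membership in the move list) once per piece; B builds an inverted index from destination square to the pieces that can reach it, then makes a single pass over the opponent positions driving index lookups, reassembling the result in piece order at the end.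
import Mathlib
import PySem

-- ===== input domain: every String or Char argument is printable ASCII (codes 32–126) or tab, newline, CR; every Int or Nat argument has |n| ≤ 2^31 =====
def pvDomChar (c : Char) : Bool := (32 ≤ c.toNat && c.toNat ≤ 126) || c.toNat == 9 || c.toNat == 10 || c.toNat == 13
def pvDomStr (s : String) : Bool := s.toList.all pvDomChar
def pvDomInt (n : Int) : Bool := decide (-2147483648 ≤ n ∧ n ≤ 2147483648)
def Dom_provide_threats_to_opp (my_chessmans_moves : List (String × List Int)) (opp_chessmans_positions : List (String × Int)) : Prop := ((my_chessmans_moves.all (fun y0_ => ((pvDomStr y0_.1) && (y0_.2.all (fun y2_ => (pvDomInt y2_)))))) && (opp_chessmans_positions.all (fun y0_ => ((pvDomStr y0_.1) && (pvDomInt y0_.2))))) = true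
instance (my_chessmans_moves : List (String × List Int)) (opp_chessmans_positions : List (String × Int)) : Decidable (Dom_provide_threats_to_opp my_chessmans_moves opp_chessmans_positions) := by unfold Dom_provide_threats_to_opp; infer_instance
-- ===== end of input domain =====

-- B replaces A's per-piece rescan of all opponent positions by an inverted index
-- (destination -> pieces reaching it) driven by a single pass over the opponents.

-- ===== PORT A =====
def provide_threats_to_opp (my_chessmans_moves : List (String × List Int)) (opp_chessmans_positions : List (String × Int)) : List (String × List Int) :=
  (my_chessmans_moves.foldl (fun (x : PySem.Dict String (List Int)) kv =>
      if kv.2.length > 0 then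
        opp_chessmans_positions.foldl (fun x pp =>
          if kv.2.contains pp.2 then
            if x.contains kv.1 then
              x.modify kv.1 [] (fun l => l ++ [pp.2])      -- x[k].append(_)
            else
              x.setdefault kv.1 [pp.2]                     -- x.setdefault(k,[_])
          else x) x
      else x)
    PySem.Dict.empty).items

-- ===== PORT B =====
def provide_threats_to_opp_alt (my_chessmans_moves : List (String × List Int)) (opp_chessmans_positions : List (String × Int)) : List (String × List Int) :=
  let index : PySem.Dict Int (List String) :=
    my_chessmans_moves.foldl (fun idx kv =>
      (PySem.List.dedup kv.2).foldl (fun idx dest =>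
        idx.modify dest [] (fun ks => ks ++ [kv.1])) idx)   -- index.setdefault(dest, []).append(k)
      PySem.Dict.empty
  let hits : PySem.Dict String (List Int) :=
    opp_chessmans_positions.foldl (fun h pp =>
      (index.getD pp.2 []).foldl (fun h k =>
        h.modify k [] (fun l => l ++ [pp.2])) h)            -- hits.setdefault(k, []).append(p)
      PySem.Dict.empty
  my_chessmans_moves.filterMap (fun kv =>
    if hits.contains kv.1 then some (kv.1, hits.getD kv.1 []) else none)

-- ===== PRECONDITION & SPEC =====
-- Pre_ requires the keys of my_chessmans_moves to be pairwise distinct: in Python the argument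
-- is a dict, whose keys are necessarily distinct, so a duplicate-key association list
-- represents no Python input; it is the association-list encoding of the dict domain.
def Pre_provide_threats_to_opp (my_chessmans_moves : List (String × List Int)) (opp_chessmans_positions : List (String × Int)) : Prop :=
  (my_chessmans_moves.map Prod.fst).Nodup
instance (my_chessmans_moves : List (String × List Int)) (opp_chessmans_positions : List (String × Int)) : Decidable (Pre_provide_threats_to_opp my_chessmans_moves opp_chessmans_positions) := by unfold Pre_provide_threats_to_opp; infer_instance

def pvWitness_provide_threats_to_opp : (List (String × List Int)) × (List (String × Int)) :=
  ([("WQ", [11, 12]), ("WK", [])], [("BK", 12), ("BP", 7)])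

def Spec_provide_threats_to_opp (my_chessmans_moves : List (String × List Int)) (opp_chessmans_positions : List (String × Int)) (out : List (String × List Int)) : Prop := out = provide_threats_to_opp_alt my_chessmans_moves opp_chessmans_positions
instance (my_chessmans_moves : List (String × List Int)) (opp_chessmans_positions : List (String × Int)) (out : List (String × List Int)) : Decidable (Spec_provide_threats_to_opp my_chessmans_moves opp_chessmans_positions out) := by unfold Spec_provide_threats_to_opp; infer_instance

-- ===== CLAIM (what is proved, stated in full; the proofs are below) =====
def Claim_equal_provide_threats_to_opp : Prop := ∀ (my_chessmans_moves : List (String × List Int)) (opp_chessmans_positions : List (String × Int)), Dom_provide_threats_to_opp my_chessmans_moves opp_chessmans_positions → Pre_provide_threats_to_opp my_chessmans_moves opp_chessmans_positions → Spec_provide_threats_to_opp my_chessmans_moves opp_chessmans_positions (provide_threats_to_opp my_chessmans_moves opp_chessmans_positions)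

-- ===== LEMMAS AND PROOFS =====

-- the positions (with multiplicity, in opponent order) of opp that lie in the move list v
def pvHits (opp : List (String × Int)) (v : List Int) : List Int :=
  (opp.map Prod.snd).filter (fun p => v.contains p)

-- the common reference value both programs compute
def pvRef (m : List (String × List Int)) (opp : List (String × Int)) : List (String × List Int) :=
  m.filterMap (fun kv => if pvHits opp kv.2 = [] then none else some (kv.1, pvHits opp kv.2))

-- the keys of m whose move list contains p, in m order (B's index bucket for p)
def pvBucket (p : Int) (m : List (String × List Int)) : List String :=
  (m.filter (fun kv => kv.2.contains p)).map Prod.fst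

lemma pv_modify_of_not_contains {κ ν : Type} [BEq κ] [LawfulBEq κ] (d : PySem.Dict κ ν)
    (k : κ) (d0 : ν) (f : ν → ν) (h : d.contains k = false) :
    d.modify k d0 f = d.insert k (f d0) := by
  simp [PySem.Dict.modify, PySem.Dict.getD_of_not_contains d d0 h]

lemma pv_nodup_filter_beq {α : Type} [BEq α] [LawfulBEq α] (l : List α) (hl : l.Nodup) (p : α) :
    l.filter (fun x => x == p) = if p ∈ l then [p] else [] := by
  induction l with
  | nil => simp
  | cons a t ih =>
    simp only [List.nodup_cons] at hl
    rw [List.filter_cons]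
    by_cases hap : a = p
    · have ht : t.filter (fun x => x == p) = [] := by
        rw [List.filter_eq_nil_iff]
        intro x hx
        simp only [beq_iff_eq]
        intro hxp
        apply hl.1
        rw [hap, ← hxp]
        exact hx
      simp [hap, ht]
    · have hpa : ¬ p = a := fun h => hap h.symm
      simp [hap, hpa, ih hl.2]

lemma pv_set_add_of_mem {α : Type} [BEq α] [LawfulBEq α] (s : PySem.Set α) (x : α) (h : x ∈ s) :
    s.add x = s := by
  simp [PySem.Set.add, h]

lemma pv_set_add_of_not_mem {α : Type} [BEq α] [LawfulBEq α] (s : PySem.Set α) (x : α) (h : x ∉ s) :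
    s.add x = s ++ [x] := by
  simp [PySem.Set.add, h]

lemma pv_set_update_replicate {α : Type} [BEq α] [LawfulBEq α] (s : PySem.Set α) (k : α) (n : Nat) :
    PySem.Set.update s (List.replicate n k) = if n = 0 then s else s.add k := by
  have haux : ∀ (n : Nat) (s : PySem.Set α), k ∈ s → PySem.Set.update s (List.replicate n k) = s := by
    intro n
    induction n with
    | zero => intro s _; simp [PySem.Set.update]
    | succ n ih =>
      intro s hs
      rw [List.replicate_succ]
      show PySem.Set.update (s.add k) (List.replicate n k) = s
      rw [pv_set_add_of_mem s k hs]; exact ih s hs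
  cases n with
  | zero => simp [PySem.Set.update]
  | succ n =>
    rw [List.replicate_succ]
    show PySem.Set.update (s.add k) (List.replicate n k) = _
    rw [haux n (s.add k) (by simp [PySem.Set.mem_add])]
    simp

lemma pv_key_unique (m : List (String × List Int)) (hnd : (m.map Prod.fst).Nodup)
    {k : String} {v v' : List Int} (h : (k, v) ∈ m) (h' : (k, v') ∈ m) : v = v' := by
  induction m with
  | nil => cases h
  | cons a t ih =>
    simp only [List.map_cons, List.nodup_cons] at hnd
    rcases List.mem_cons.mp h with h1 | h1
    · rcases List.mem_cons.mp h' with h2 | h2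
      · rw [← h1] at h2; exact (Prod.mk.injEq _ _ _ _ ▸ h2).2.symm
      · exfalso; apply hnd.1
        exact List.mem_map.mpr ⟨(k, v'), h2, by rw [← h1]⟩
    · rcases List.mem_cons.mp h' with h2 | h2
      · exfalso; apply hnd.1
        exact List.mem_map.mpr ⟨(k, v), h1, by rw [← h2]⟩
      · exact ih hnd.2 h1 h2

lemma pv_mem_bucket (p : Int) (m : List (String × List Int)) (c : String) :
    c ∈ pvBucket p m ↔ ∃ v, (c, v) ∈ m ∧ v.contains p := by
  unfold pvBucket
  constructor
  · intro h
    rcases List.mem_map.mp h with ⟨kv, hkv, hfst⟩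
    rcases List.mem_filter.mp hkv with ⟨hm, hc⟩
    exact ⟨kv.2, by rw [← hfst]; exact (by simpa using hm), hc⟩
  · rintro ⟨v, hm, hc⟩
    exact List.mem_map.mpr ⟨(c, v), List.mem_filter.mpr ⟨hm, hc⟩, rfl⟩

lemma pv_bucket_nodup (p : Int) (m : List (String × List Int)) (hnd : (m.map Prod.fst).Nodup) :
    (pvBucket p m).Nodup := by
  unfold pvBucket
  exact hnd.sublist (List.Sublist.map Prod.fst (List.filter_sublist (l := m)))

lemma pv_hits_eq_flatMap (opp : List (String × Int)) (v : List Int) :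
    pvHits opp v = opp.flatMap (fun pp => if v.contains pp.2 then [pp.2] else []) := by
  induction opp with
  | nil => simp [pvHits]
  | cons pp t ih =>
    unfold pvHits at ih ⊢
    rw [List.map_cons, List.filter_cons, List.flatMap_cons, ih]
    by_cases hc : v.contains pp.2
    · rw [if_pos hc, if_pos hc]
      rfl
    · rw [if_neg hc, if_neg hc]
      rfl

-- ============ A side ============

-- A's per-piece inner loop, rewritten as a uniform modify-fold
lemma pv_A_inner (opp : List (String × Int)) (k : String) (v : List Int)
    (x : PySem.Dict String (List Int)) :
    opp.foldl (fun x pp =>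
        if v.contains pp.2 then
          if x.contains k then x.modify k [] (fun l => l ++ [pp.2])
          else x.setdefault k [pp.2]
        else x) x
    = ((opp.filter (fun pp => v.contains pp.2)).map (fun pp => (k, pp.2))).foldl
        (fun d q => d.modify q.1 [] (fun l => l ++ [q.2])) x := by
  rw [PySem.List.foldl_congr_mem opp _
    (fun x pp => if v.contains pp.2 then x.modify k [] (fun l => l ++ [pp.2]) else x) x ?_]
  · rw [← List.foldl_filter, List.foldl_map]
  · intro acc pp _
    show _ = if v.contains pp.2 then acc.modify k [] (fun l => l ++ [pp.2]) else acc
    by_cases hc : v.contains pp.2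
    · rw [if_pos hc, if_pos hc]
      by_cases hk : acc.contains k
      · rw [if_pos hk]
      · rw [if_neg hk,
          PySem.Dict.setdefault_of_not_contains acc [pp.2] (by simpa using hk),
          pv_modify_of_not_contains acc k [] _ (by simpa using hk)]
        rfl
    · rw [if_neg hc, if_neg hc]

-- one outer step of A, on a fresh key
lemma pv_A_step (opp : List (String × Int)) (k : String) (v : List Int)
    (x : PySem.Dict String (List Int)) (hnd : x.keys.Nodup) (hk : k ∉ x.keys) :
    (if v.length > 0 then
        opp.foldl (fun x pp =>
          if v.contains pp.2 then
            if x.contains k then x.modify k [] (fun l => l ++ [pp.2])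
            else x.setdefault k [pp.2]
          else x) x
      else x).items = x.items ++ (if pvHits opp v = [] then [] else [(k, pvHits opp v)])
    ∧ (if v.length > 0 then
        opp.foldl (fun x pp =>
          if v.contains pp.2 then
            if x.contains k then x.modify k [] (fun l => l ++ [pp.2])
            else x.setdefault k [pp.2]
          else x) x
      else x).keys = x.keys ++ (if pvHits opp v = [] then [] else [k]) := by
  have hcontains : x.contains k = false := by
    rw [PySem.Dict.contains_eq_decide_mem_keys]; simpa using hk
  by_cases hv : v.length > 0
  case neg =>
    have hv0 : v = [] := by
      cases v with | nil => rfl | cons a t => simp at hv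
    subst hv0
    have hh : pvHits opp [] = [] := by simp [pvHits]
    simp [hh]
  case pos =>
    rw [if_pos hv, pv_A_inner]
    set L := (opp.filter (fun pp => v.contains pp.2)).map (fun pp => ((k : String), pp.2)) with hL
    set res := L.foldl (fun d q => d.modify q.1 [] (fun l => l ++ [q.2])) x with hres
    have hLfst : L.map Prod.fst = List.replicate (opp.filter (fun pp => v.contains pp.2)).length k := by
      rw [hL, List.map_map]
      exact List.map_const'
    have hhitseq : pvHits opp v = L.map Prod.snd := by
      rw [hL, List.map_map]
      show pvHits opp v = (opp.filter (fun pp => v.contains pp.2)).map (fun pp => pp.2)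
      unfold pvHits
      rw [List.filter_map]
      rfl
    have hkeys : res.keys = x.keys ++ (if pvHits opp v = [] then [] else [k]) := by
      rw [hres, PySem.Dict.keys_foldl_modify_key L Prod.fst [] (fun _ q => (fun l => l ++ [q.2])) x,
        hLfst, pv_set_update_replicate]
      by_cases hnil : (opp.filter (fun pp => v.contains pp.2)) = []
      · have hz : pvHits opp v = [] := by rw [hhitseq, hL, hnil]; rfl
        rw [hnil, hz]
        simp
      · have hlen : (opp.filter (fun pp => v.contains pp.2)).length ≠ 0 := by
          simpa [List.length_eq_zero_iff] using hnil
        have hne : pvHits opp v ≠ [] := by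
          rw [hhitseq]
          rw [hL, List.map_map]
          intro hmapnil
          exact hnil (List.map_eq_nil_iff.mp hmapnil)
        rw [if_neg hlen, if_neg hne, pv_set_add_of_not_mem x.keys k hk]
    have hgetD : ∀ c, res.getD c [] = x.getD c [] ++ (L.filter (fun q => q.1 == c)).map Prod.snd := by
      intro c
      rw [hres]
      exact PySem.Dict.getD_foldl_modify_append L x c
    have hother : ∀ c, c ≠ k → (L.filter (fun q => q.1 == c)) = [] := by
      intro c hck
      rw [List.filter_eq_nil_iff]
      intro q hq
      rcases List.mem_map.mp hq with ⟨pp, _, hpq⟩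
      rw [← hpq]; simp [Ne.symm hck]
    have hself : (L.filter (fun q => q.1 == k)) = L := by
      rw [List.filter_eq_self]
      intro q hq
      rcases List.mem_map.mp hq with ⟨pp, _, hpq⟩
      rw [← hpq]; simp
    have hresnodup : res.keys.Nodup := by
      rw [hkeys]
      by_cases hnil : pvHits opp v = []
      · simpa [hnil] using hnd
      · rw [if_neg hnil]
        simp only [List.nodup_append]
        refine ⟨hnd, by simp, ?_⟩
        intro a ha b hb
        simp only [List.mem_singleton] at hb
        subst hb
        exact fun h => hk (h ▸ ha)
    refine ⟨?_, hkeys⟩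
    rw [PySem.Dict.items_eq_map_keys res hresnodup [], hkeys, List.map_append]
    congr 1
    · rw [List.map_congr_left (fun c hc => ?_), ← PySem.Dict.items_eq_map_keys x hnd []]
      have hck : c ≠ k := fun h => hk (h ▸ hc)
      rw [hgetD c, hother c hck, List.map_nil, List.append_nil]
    · by_cases hnil : pvHits opp v = []
      · simp [hnil]
      · rw [if_neg hnil, if_neg hnil, List.map_cons, List.map_nil]
        rw [hgetD k, hself, PySem.Dict.getD_of_not_contains x [] hcontains,
          List.nil_append, ← hhitseq]

lemma pv_A_fold (opp : List (String × Int)) (m : List (String × List Int))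
    (x : PySem.Dict String (List Int)) (hndx : x.keys.Nodup)
    (hnd : (m.map Prod.fst).Nodup) (hfresh : ∀ kv ∈ m, kv.1 ∉ x.keys) :
    (m.foldl (fun (x : PySem.Dict String (List Int)) kv =>
      if kv.2.length > 0 then
        opp.foldl (fun x pp =>
          if kv.2.contains pp.2 then
            if x.contains kv.1 then x.modify kv.1 [] (fun l => l ++ [pp.2])
            else x.setdefault kv.1 [pp.2]
          else x) x
      else x) x).items = x.items ++ pvRef m opp := by
  induction m generalizing x with
  | nil => simp [pvRef]
  | cons kv t ih =>
    obtain ⟨k, v⟩ := kv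
    simp only [List.map_cons, List.nodup_cons] at hnd
    have hkfresh : k ∉ x.keys := by
      simpa using hfresh (k, v) List.mem_cons_self
    obtain ⟨hit, hkey⟩ := pv_A_step opp k v x hndx hkfresh
    rw [List.foldl_cons]
    set x' := (if v.length > 0 then
        opp.foldl (fun x pp =>
          if v.contains pp.2 then
            if x.contains k then x.modify k [] (fun l => l ++ [pp.2])
            else x.setdefault k [pp.2]
          else x) x
      else x) with hx'
    have hnd' : x'.keys.Nodup := by
      rw [hkey]
      by_cases hnil : pvHits opp v = []
      · simpa [hnil] using hndx
      · rw [if_neg hnil]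
        simp only [List.nodup_append]
        refine ⟨hndx, by simp, ?_⟩
        intro a ha b hb
        simp only [List.mem_singleton] at hb
        subst hb
        exact fun h => hkfresh (h ▸ ha)
    have hfresh' : ∀ kv ∈ t, kv.1 ∉ x'.keys := by
      intro kv hkv
      rw [hkey]
      simp only [List.mem_append]
      rintro (hmem | hmem)
      · exact hfresh kv (List.mem_cons_of_mem _ hkv) hmem
      · apply hnd.1
        have : kv.1 = k := by
          by_cases hnil : pvHits opp v = []
          · rw [hnil] at hmem; simp at hmem
          · rw [if_neg hnil] at hmem; simpa using hmem
        rw [← this]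
        exact List.mem_map.mpr ⟨kv, hkv, rfl⟩
    have := ih x' hnd' hnd.2 hfresh'
    rw [this, hit]
    have hrefcons : pvRef ((k, v) :: t) opp
        = (if pvHits opp v = [] then [] else [(k, pvHits opp v)]) ++ pvRef t opp := by
      unfold pvRef
      rw [List.filterMap_cons]
      by_cases hnil : pvHits opp v = [] <;> simp [hnil]
    rw [hrefcons, List.append_assoc]

lemma pv_A_eq_ref (m : List (String × List Int)) (opp : List (String × Int))
    (hnd : (m.map Prod.fst).Nodup) :
    provide_threats_to_opp m opp = pvRef m opp := by
  unfold provide_threats_to_opp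
  rw [pv_A_fold opp m PySem.Dict.empty PySem.Dict.nodup_keys_empty hnd
    (by intro kv _; simp [PySem.Dict.keys_empty])]
  rfl

-- ============ B side ============

lemma pv_index_getD (m : List (String × List Int)) (p : Int) :
    (m.foldl (fun idx kv =>
        (PySem.List.dedup kv.2).foldl (fun idx dest =>
          idx.modify dest [] (fun ks => ks ++ [kv.1])) idx)
      (PySem.Dict.empty : PySem.Dict Int (List String))).getD p [] = pvBucket p m := by
  have hflat : (m.foldl (fun idx kv =>
        (PySem.List.dedup kv.2).foldl (fun idx dest =>
          idx.modify dest [] (fun ks => ks ++ [kv.1])) idx)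
      (PySem.Dict.empty : PySem.Dict Int (List String)))
      = (m.flatMap (fun kv => (PySem.List.dedup kv.2).map (fun dest => (dest, kv.1)))).foldl
          (fun d q => d.modify q.1 [] (fun ks => ks ++ [q.2])) PySem.Dict.empty := by
    rw [List.foldl_flatMap]
    apply PySem.List.foldl_congr_mem
    intro acc kv _
    rw [List.foldl_map]
  rw [hflat, PySem.Dict.getD_foldl_modify_append, PySem.Dict.getD_empty, List.nil_append]
  clear hflat
  induction m with
  | nil => simp [pvBucket]
  | cons kv t ih =>
    rw [List.flatMap_cons, List.filter_append, List.map_append, ih]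
    have hhead : (((PySem.List.dedup kv.2).map (fun dest => (dest, kv.1))).filter
        (fun q => q.1 == p)).map Prod.snd
        = if kv.2.contains p then [kv.1] else [] := by
      rw [List.filter_map]
      show ((((PySem.List.dedup kv.2).filter (fun d => d == p))).map (fun dest => (dest, kv.1))).map Prod.snd = _
      rw [pv_nodup_filter_beq _ (PySem.List.nodup_dedup kv.2) p]
      by_cases hp : p ∈ kv.2
      · simp [hp]
      · simp [hp]
    rw [hhead]
    by_cases hp : p ∈ kv.2
    · simp [pvBucket, hp]
    · simp [pvBucket, hp]

lemma pv_hits_getD (m : List (String × List Int)) (opp : List (String × Int))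
    (hnd : (m.map Prod.fst).Nodup) (c : String) (v : List Int) (hcv : (c, v) ∈ m) :
    (opp.foldl (fun h pp =>
        (pvBucket pp.2 m).foldl (fun h k =>
          h.modify k [] (fun l => l ++ [pp.2])) h)
      (PySem.Dict.empty : PySem.Dict String (List Int))).getD c [] = pvHits opp v := by
  have hflat : (opp.foldl (fun h pp =>
        (pvBucket pp.2 m).foldl (fun h k =>
          h.modify k [] (fun l => l ++ [pp.2])) h)
      (PySem.Dict.empty : PySem.Dict String (List Int)))
      = (opp.flatMap (fun pp => (pvBucket pp.2 m).map (fun k => (k, pp.2)))).foldl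
          (fun d q => d.modify q.1 [] (fun l => l ++ [q.2])) PySem.Dict.empty := by
    rw [List.foldl_flatMap]
    apply PySem.List.foldl_congr_mem
    intro acc pp _
    rw [List.foldl_map]
  rw [hflat, PySem.Dict.getD_foldl_modify_append, PySem.Dict.getD_empty, List.nil_append,
    pv_hits_eq_flatMap]
  clear hflat
  induction opp with
  | nil => simp
  | cons pp t ih =>
    rw [List.flatMap_cons, List.filter_append, List.map_append, ih, List.flatMap_cons]
    congr 1
    rw [List.filter_map]
    show (((pvBucket pp.2 m).filter (fun k => k == c)).map (fun k => (k, pp.2))).map Prod.snd = _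
    rw [pv_nodup_filter_beq _ (pv_bucket_nodup pp.2 m hnd) c]
    by_cases hcb : c ∈ pvBucket pp.2 m
    · rcases (pv_mem_bucket pp.2 m c).mp hcb with ⟨v', hv', hc'⟩
      have hvv : v' = v := pv_key_unique m hnd hv' hcv
      rw [hvv] at hc'
      have hmemv : pp.2 ∈ v := by simpa using hc'
      simp [hcb, hmemv]
    · have hnc : pp.2 ∉ v := by
        intro hmemv
        exact hcb ((pv_mem_bucket pp.2 m c).mpr ⟨v, hcv, by simpa using hmemv⟩)
      simp [hcb, hnc]

lemma pv_hits_contains (m : List (String × List Int)) (opp : List (String × Int))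
    (hnd : (m.map Prod.fst).Nodup) (c : String) (v : List Int) (hcv : (c, v) ∈ m) :
    (opp.foldl (fun h pp =>
        (pvBucket pp.2 m).foldl (fun h k =>
          h.modify k [] (fun l => l ++ [pp.2])) h)
      (PySem.Dict.empty : PySem.Dict String (List Int))).contains c
    = decide (pvHits opp v ≠ []) := by
  have hflat : (opp.foldl (fun h pp =>
        (pvBucket pp.2 m).foldl (fun h k =>
          h.modify k [] (fun l => l ++ [pp.2])) h)
      (PySem.Dict.empty : PySem.Dict String (List Int)))
      = (opp.flatMap (fun pp => (pvBucket pp.2 m).map (fun k => (k, pp.2)))).foldl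
          (fun d q => d.modify q.1 [] (fun l => l ++ [q.2])) PySem.Dict.empty := by
    rw [List.foldl_flatMap]
    apply PySem.List.foldl_congr_mem
    intro acc pp _
    rw [List.foldl_map]
  rw [hflat, PySem.Dict.contains_eq_decide_mem_keys,
    PySem.Dict.keys_foldl_modify_key _ Prod.fst [] (fun _ q => (fun l => l ++ [q.2]))]
  rw [decide_eq_decide]
  rw [PySem.Set.mem_update]
  simp only [PySem.Dict.keys_empty, List.mem_nil_iff, false_or]
  constructor
  · intro hmem
    rcases List.mem_map.mp hmem with ⟨q, hq, hq1⟩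
    rcases List.mem_flatMap.mp hq with ⟨pp, hpp, hqpp⟩
    rcases List.mem_map.mp hqpp with ⟨k', hk', hk'q⟩
    have hcb : c ∈ pvBucket pp.2 m := by
      rw [← hq1, ← hk'q]; exact hk'
    rcases (pv_mem_bucket pp.2 m c).mp hcb with ⟨v', hv', hc'⟩
    have hvv : v' = v := pv_key_unique m hnd hv' hcv
    rw [hvv] at hc'
    have hmemv : pp.2 ∈ v := by simpa using hc'
    intro hh
    rw [pv_hits_eq_flatMap] at hh
    have hx : pp.2 ∈ opp.flatMap (fun pp => if v.contains pp.2 then [pp.2] else []) := by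
      apply List.mem_flatMap.mpr ⟨pp, hpp, ?_⟩
      rw [if_pos hc']
      simp
    rw [hh] at hx
    cases hx
  · intro hne
    rw [pv_hits_eq_flatMap] at hne
    rcases List.exists_mem_of_ne_nil _ hne with ⟨p, hp⟩
    rcases List.mem_flatMap.mp hp with ⟨pp, hpp, hppx⟩
    by_cases hc' : v.contains pp.2
    · apply List.mem_map.mpr
      refine ⟨(c, pp.2), ?_, rfl⟩
      apply List.mem_flatMap.mpr ⟨pp, hpp, ?_⟩
      apply List.mem_map.mpr
      exact ⟨c, (pv_mem_bucket pp.2 m c).mpr ⟨v, hcv, hc'⟩, rfl⟩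
    · rw [if_neg hc'] at hppx
      cases hppx

lemma pv_B_eq_ref (m : List (String × List Int)) (opp : List (String × Int))
    (hnd : (m.map Prod.fst).Nodup) :
    provide_threats_to_opp_alt m opp = pvRef m opp := by
  unfold provide_threats_to_opp_alt
  simp only [pv_index_getD]
  unfold pvRef
  apply List.filterMap_congr
  intro kv hkv
  obtain ⟨c, v⟩ := kv
  rw [pv_hits_contains m opp hnd c v hkv, pv_hits_getD m opp hnd c v hkv]
  by_cases hnil : pvHits opp v = []
  · simp [hnil]
  · simp [hnil]

-- ===== VERDICT (by name: the statement is the Claim_ definition above) =====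
theorem provide_threats_to_opp_spec : Claim_equal_provide_threats_to_opp := by
  intro m opp _ hpre
  unfold Spec_provide_threats_to_opp
  rw [pv_A_eq_ref m opp hpre, pv_B_eq_ref m opp hpre]
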